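-- pv_equiv track=rewrite | github.com/pedroegg/PythonChat | Cliente.py | descriptografar
-- ===== SOURCE A (Python) =====
-- def descriptografar(textoParametro):
--     textoRetorno = ''
--     kIterador = 0
--     x = 0
--     while x < len(textoParametro):
--         textoRetorno = textoRetorno + chr(subtrair(ord(textoParametro[x]), ord(palavraChave[kIterador])))
--         if kIterador < len(palavraChave)-1:
--             kIterador = kIterador + 1
--         else:
--             kIterador = 0
--         x = x + 1
--     return textoRetorno
--
-- def subtrair(valor1, valor2):
--
--     if valor1 - valor2 < 32:
--         valorReal = valor1
--         for x in range(0, valor2, 1):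
--             if valorReal - 1 == 31:
--                 valorReal = 126
--             else:
--                 valorReal = valorReal - 1
--         return valorReal
--     else:
--         return valor1 - valor2
--
-- palavraChave = 'Lampada'
-- ===== SOURCE B (Python) =====
-- palavraChave = 'Lampada'
--
-- def descriptografar(textoParametro):
--     n = len(palavraChave)
--     return ''.join(
--         chr((ord(c) - 32 - ord(palavraChave[i % n])) % 95 + 32)
--         for i, c in enumerate(textoParametro)
--     )
-- ===== Notes on version B (the rewrite author's own statement) =====
-- stated objective: simpler
-- what changed: Replaces subtrair's per-character decrement loop (up to ord(key) iterations with a wrap at 32->126) by a closed-form modular expression (x-32-k) % 95 + 32, and the explicit while loop with manual key-index cycling by a single join over enumerate with i % len(key).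
import Mathlib
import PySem

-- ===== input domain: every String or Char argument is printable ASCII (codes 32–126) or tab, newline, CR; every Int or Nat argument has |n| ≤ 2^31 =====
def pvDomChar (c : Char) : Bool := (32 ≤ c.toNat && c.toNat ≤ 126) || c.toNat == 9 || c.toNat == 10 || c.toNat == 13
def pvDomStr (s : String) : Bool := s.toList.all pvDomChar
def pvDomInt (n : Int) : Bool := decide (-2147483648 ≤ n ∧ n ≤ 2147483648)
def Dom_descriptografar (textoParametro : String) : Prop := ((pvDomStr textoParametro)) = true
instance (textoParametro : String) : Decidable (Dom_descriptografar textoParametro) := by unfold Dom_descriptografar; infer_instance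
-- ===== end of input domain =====

set_option maxRecDepth 4000


-- B replaces A's per-character decrement loop by the closed-form (x-32-k) % 95 + 32 and the
-- manual key-index cycling by i % len(key) over enumerate (objective: simpler).

-- ===== PORT A =====
def palavraChave : String := "Lampada"

def subtrair (valor1 valor2 : Int) : Int :=
  if valor1 - valor2 < 32 then
    (PySem.List.pyRange 0 valor2 1).foldl
      (fun valorReal _ => if valorReal - 1 == 31 then 126 else valorReal - 1) valor1
  else valor1 - valor2

-- while loop of A: state (kIterador, textoRetorno); accumulator kept as List Char, wrapped by
-- String.ofList at the end (Lean's String.append is opaque to the kernel).  chr is exact here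
-- because Pre_ guarantees the argument is a nonnegative code (otherwise Python raises).
def descrGo : List Char → Int → List Char → List Char
  | [], _, textoRetorno => textoRetorno
  | c :: rest, kIterador, textoRetorno =>
    let textoRetorno' := textoRetorno ++
      [Char.ofNat (subtrair (c.toNat : Int)
        (((palavraChave.toList.getD kIterador.toNat 'A').toNat : Int))).toNat]
    let kIterador' := if kIterador < PySem.Str.len palavraChave - 1 then kIterador + 1 else 0
    descrGo rest kIterador' textoRetorno'

def descriptografar (textoParametro : String) : String :=
  String.ofList (descrGo textoParametro.toList 0 [])

-- ===== PORT B =====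
def descriptografar_alt (textoParametro : String) : String :=
  String.ofList ((PySem.List.enumerate textoParametro.toList 0).map (fun p =>
    Char.ofNat (PySem.Int.mod ((p.2.toNat : Int) - 32 -
      ((palavraChave.toList.getD (PySem.Int.mod p.1 (PySem.Str.len palavraChave)).toNat 'A').toNat : Int))
      95 + 32).toNat))

-- ===== PRECONDITION & SPEC =====
-- Pre_ excludes exactly the strings containing a character of code < 32 (tab/newline/CR in Dom):
-- there subtrair yields a negative code and A's chr() raises ValueError.
def Pre_descriptografar (textoParametro : String) : Prop :=
  (textoParametro.toList.all (fun c => decide (32 ≤ c.toNat))) = true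
instance (textoParametro : String) : Decidable (Pre_descriptografar textoParametro) := by
  unfold Pre_descriptografar; infer_instance
def pvWitness_descriptografar : String := "Hi!"


def Spec_descriptografar (textoParametro : String) (out : String) : Prop :=
  out = descriptografar_alt textoParametro
instance (textoParametro : String) (out : String) : Decidable (Spec_descriptografar textoParametro out) := by
  unfold Spec_descriptografar; infer_instance

-- ===== CLAIM (what is proved, stated in full; the proofs are below) =====
def Claim_equal_descriptografar : Prop := ∀ (textoParametro : String), Dom_descriptografar textoParametro → Pre_descriptografar textoParametro → Spec_descriptografar textoParametro (descriptografar textoParametro)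


-- ===== LEMMAS AND PROOFS =====

-- key character codes
lemma keycode_mem : ∀ k : Nat, k < 7 →
    ((palavraChave.toList.getD k 'A').toNat : Int) ∈ ([76, 97, 109, 112, 100] : List Int) := by
  decide

-- closed form for subtrair on the printable window, for each key code
lemma sub_key : ∀ v2 ∈ ([76, 97, 109, 112, 100] : List Int), ∀ d : Nat, d < 95 →
    subtrair ((d : Int) + 32) v2 = PySem.Int.mod ((d : Int) + 32 - 32 - v2) 95 + 32 := by
  decide

lemma sub_key' (v1 : Nat) (h1 : 32 ≤ v1) (h2 : v1 ≤ 126) (v2 : Int)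
    (hv2 : v2 ∈ ([76, 97, 109, 112, 100] : List Int)) :
    subtrair (v1 : Int) v2 = PySem.Int.mod ((v1 : Int) - 32 - v2) 95 + 32 := by
  have h := sub_key v2 hv2 (v1 - 32) (by omega)
  have hc : ((v1 - 32 : Nat) : Int) + 32 = (v1 : Int) := by omega
  rwa [hc] at h

lemma len_key : PySem.Str.len palavraChave = 7 := by decide

lemma go_enum : ∀ (l : List Char) (s : Nat) (acc : List Char),
    (∀ c ∈ l, 32 ≤ c.toNat ∧ c.toNat ≤ 126) →
    descrGo l (((s % 7 : Nat) : Int)) acc =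
      acc ++ (PySem.List.enumerate l (s : Int)).map (fun p =>
        Char.ofNat (PySem.Int.mod ((p.2.toNat : Int) - 32 -
          ((palavraChave.toList.getD (PySem.Int.mod p.1 (PySem.Str.len palavraChave)).toNat 'A').toNat : Int))
          95 + 32).toNat) := by
  intro l
  induction l with
  | nil => intro s acc _; simp [descrGo, PySem.List.enumerate_nil]
  | cons c rest ih =>
    intro s acc h
    obtain ⟨hc, hrest⟩ := List.forall_mem_cons.mp h
    rw [PySem.List.enumerate_cons, List.map_cons]
    simp only [descrGo]
    -- the emitted character agrees
    have hchar : subtrair ((c.toNat : Int))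
        (((palavraChave.toList.getD ((s % 7 : Nat) : Int).toNat 'A').toNat : Int)) =
        PySem.Int.mod ((c.toNat : Int) - 32 -
          ((palavraChave.toList.getD (PySem.Int.mod (s : Int) (PySem.Str.len palavraChave)).toNat 'A').toNat : Int))
          95 + 32 := by
      rw [len_key]
      have hm : PySem.Int.mod (s : Int) 7 = (((s % 7 : Nat) : Int)) := by
        simp
      rw [hm, Int.toNat_natCast]
      exact sub_key' c.toNat hc.1 hc.2 _ (keycode_mem (s % 7) (Nat.mod_lt _ (by omega)))
    -- the key-index update agrees with (s+1) % 7
    have hk : (if (((s % 7 : Nat) : Int)) < PySem.Str.len palavraChave - 1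
        then (((s % 7 : Nat) : Int)) + 1 else 0) = (((s + 1) % 7 : Nat) : Int) := by
      rw [len_key]; split_ifs with hlt <;> omega
    rw [hchar, hk, ih (s + 1) _ hrest]
    simp [List.append_assoc]

-- ===== VERDICT (by name: the statement is the Claim_ definition above) =====
theorem descriptografar_spec : Claim_equal_descriptografar := by
  intro t hdom hpre
  unfold Pre_descriptografar at hpre
  unfold Spec_descriptografar descriptografar descriptografar_alt
  have h : ∀ c ∈ t.toList, 32 ≤ c.toNat ∧ c.toNat ≤ 126 := by
    intro c hc
    have hd : pvDomChar c = true := by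
      have := hdom
      unfold Dom_descriptografar pvDomStr at this
      exact List.all_eq_true.mp this c hc
    have hp : 32 ≤ c.toNat := by
      have := List.all_eq_true.mp hpre c hc
      exact of_decide_eq_true this
    unfold pvDomChar at hd
    simp only [Bool.or_eq_true, Bool.and_eq_true, decide_eq_true_eq, beq_iff_eq] at hd
    omega
  apply congrArg String.ofList
  simpa using go_enum t.toList 0 [] h
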